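-- pv_equiv track=rewrite | github.com/Dolphin4mi/zhihuBlogCopyer | make_inline_math_bule.py | outline_math_to_bule
-- ===== SOURCE A (Python) =====
-- def outline_math_to_bule(md_name, lines):
--     lineloc = 0
--     waiting_for_end = False
--     paired = False
--     endDollar = 0
--     lines_len = len(lines)
--     while lines_len>lineloc:
--         line = str(lines[lineloc])
--         if line[0:2] == r"$$" and not waiting_for_end:
--             startDollar = lineloc
--             waiting_for_end = True
--             lineloc = lineloc + 1
--             continue
--         if line[0:2] == r"$$" and waiting_for_end:
--             endDollar = lineloc
--             waiting_for_end = False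
--             paired = True
--         if paired:
--             lines.insert(startDollar+1, "\\textcolor{bule}{\n")
--             lines.insert(endDollar+1, "}\n")
--             lineloc = lineloc+3
--             paired = False
--         if not paired:
--             lineloc = lineloc + 1
--         lines_len = len(lines)
--     return lines
-- ===== SOURCE B (Python) =====
-- # Single emit pass building a new list (block parser), instead of A's in-place
-- # insertions with a moving cursor; mutates `lines` in place like A (lines[:] = out).
-- # Intended difference: A skips the line right after a closing "$$", so a "$$" block
-- # starting immediately after a closing "$$" line is left unwrapped; B wraps it.
-- def outline_math_to_bule(md_name, lines):
--     out = []
--     i = 0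
--     n = len(lines)
--     while i < n:
--         l = lines[i]
--         if str(l)[0:2] == "$$":
--             j = i + 1
--             while j < n and str(lines[j])[0:2] != "$$":
--                 j += 1
--             if j == n:
--                 out.extend(lines[i:])
--                 i = n
--             else:
--                 out.append(l)
--                 out.append("\\textcolor{bule}{\n")
--                 out.extend(lines[i + 1:j])
--                 out.append("}\n")
--                 out.append(lines[j])
--                 i = j + 1
--         else:
--             out.append(l)
--             i += 1
--     lines[:] = out
--     return lines
-- ===== Notes on version B (the rewrite author's own statement) =====
-- stated objective: alternative
-- what changed: B makes one emit pass that scans ahead to the closing '$$' line and appends the wrapped block to a fresh output list, instead of A's rescanning cursor loop with repeated in-place list.insert calls; B writes the result back with lines[:] = out to keep A's in-place mutation.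
-- intended difference: On inputs where a closing '$$' line is immediately followed by another '$$' line and at least one more '$$' line occurs later, A's dead 'if not paired' advance skips that following delimiter and leaves its block unwrapped, while B wraps every consecutively-paired '$$' block, which is the intended behaviour. — e.g. on outline_math_to_bule("m", ["$$", "$$", "$$", "$$"]): A returns ["$$", "\\textcolor{bule}{\n", "}\n", "$$", "$$", "$$"], B returns ["$$", "\\textcolor{bule}{\n", "}\n", "$$", "$$", "\\textcolor{bule}{\n", "}\n", "$$"]
import Mathlib
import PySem

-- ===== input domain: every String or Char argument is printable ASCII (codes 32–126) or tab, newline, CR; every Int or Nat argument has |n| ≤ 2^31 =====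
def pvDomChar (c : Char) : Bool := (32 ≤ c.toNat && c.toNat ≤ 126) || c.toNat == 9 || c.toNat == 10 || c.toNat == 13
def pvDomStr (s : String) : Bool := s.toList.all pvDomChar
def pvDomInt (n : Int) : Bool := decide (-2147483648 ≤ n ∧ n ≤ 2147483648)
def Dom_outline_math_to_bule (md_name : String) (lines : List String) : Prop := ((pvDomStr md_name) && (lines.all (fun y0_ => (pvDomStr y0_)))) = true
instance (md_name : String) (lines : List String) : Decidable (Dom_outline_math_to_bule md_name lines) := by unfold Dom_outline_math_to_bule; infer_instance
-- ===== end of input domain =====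

-- B replaces A's in-place insertions with one emit pass and also wraps the '$$' block A misses
-- right after a closing '$$' (the stated intended difference); return-value equivalence only:
-- the Python A mutates `lines` in place, and Python B mirrors that with lines[:] = out.

-- ===== PORT A =====
-- shared helper: the test `line[0:2] == "$$"` both Pythons perform
def pfx (line : String) : Bool := PySem.Str.slice line none (some 2) == "$$"

def tcLine : String := "\\textcolor{bule}{\n"
def rbLine : String := "}\n"

-- A's while loop. `fuel` is only a totality guard (each iteration strictly decreases
-- len(lines) - lineloc, which starts at len(lines), so lines.length + 1 never runs out).
-- In A the `paired` flag set by the second branch is consumed immediately: the branch does the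
-- two inserts and `lineloc += 3`, and the following `if not paired` (paired was reset) adds 1
-- more, hence `lineloc + 3 + 1` here.
def loopA (fuel : Nat) (lines : List String) (lineloc : Int) (waiting : Bool) (startDollar : Int) : List String :=
  match fuel with
  | 0 => lines
  | fuel + 1 =>
    if (lines.length : Int) > lineloc then
      let line := (PySem.List.pyGet? lines lineloc).getD ""
      if pfx line && !waiting then
        loopA fuel lines (lineloc + 1) true lineloc
      else if pfx line && waiting then
        let lines1 := PySem.List.insert lines (startDollar + 1) tcLine
        let lines2 := PySem.List.insert lines1 (lineloc + 1) rbLine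
        loopA fuel lines2 (lineloc + 3 + 1) false startDollar
      else
        loopA fuel lines (lineloc + 1) waiting startDollar
    else lines

def outline_math_to_bule (md_name : String) (lines : List String) : List String :=
  loopA (lines.length + 1) lines 0 false 0

-- ===== PORT B =====
-- B's single emit pass: out-accumulation in Python becomes emitting the head of the result;
-- `waiting`/`pending` are B's state (pending = opener plus block body seen so far).
def emitAlt (ls : List String) (waiting : Bool) (pending : List String) : List String :=
  match ls with
  | [] => pending
  | l :: rest =>
    if pfx l then
      if waiting then
        match pending with
        | p0 :: ptail => p0 :: tcLine :: ptail ++ rbLine :: l :: emitAlt rest false []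
        | [] => tcLine :: rbLine :: l :: emitAlt rest false []   -- unreachable: pending ≠ [] while waiting
      else emitAlt rest true [l]
    else
      if waiting then emitAlt rest waiting (pending ++ [l])
      else l :: emitAlt rest waiting pending

def outline_math_to_bule_alt (md_name : String) (lines : List String) : List String :=
  emitAlt lines false []

-- ===== PRECONDITION & SPEC =====
-- scan with a parity bit w ("inside a block"): bad iff some closing "$$" line is immediately
-- followed by another "$$" line with at least one more "$$" line after that
def badScan : List String → Bool → Bool
  | [], _ => false
  | l :: rest, w =>
    (w && pfx l && pfx (rest.headD "") && (rest.drop 1).any pfx) || badScan rest (xor (pfx l) w)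

-- On inputs where a closing '$$' line is immediately followed by another '$$' line and at least
-- one more '$$' line occurs later, A's dead `if not paired` advance skips that delimiter and
-- leaves its block unwrapped; B wraps every consecutively-paired '$$' block (the intended value).
def D_outline_math_to_bule (md_name : String) (lines : List String) : Prop :=
  badScan lines false = true
instance (md_name : String) (lines : List String) : Decidable (D_outline_math_to_bule md_name lines) := by
  unfold D_outline_math_to_bule; infer_instance

def Spec_outline_math_to_bule (md_name : String) (lines : List String) (out : List String) : Prop :=
  ¬ D_outline_math_to_bule md_name lines → out = outline_math_to_bule_alt md_name lines
instance (md_name : String) (lines : List String) (out : List String) : Decidable (Spec_outline_math_to_bule md_name lines out) := by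
  unfold Spec_outline_math_to_bule; infer_instance

def pvDiffWitness_outline_math_to_bule : String × List String := ("m", ["$$", "$$", "$$", "$$"])
def pvDiffWitnessOut_outline_math_to_bule : (List String) × (List String) :=
  (["$$", "\\textcolor{bule}{\n", "}\n", "$$", "$$", "$$"],
   ["$$", "\\textcolor{bule}{\n", "}\n", "$$", "$$", "\\textcolor{bule}{\n", "}\n", "$$"])

-- ===== CLAIM (what is proved, stated in full; the proofs are below) =====
def Claim_unchanged_outline_math_to_bule : Prop := ∀ (md_name : String) (lines : List String), Dom_outline_math_to_bule md_name lines → Spec_outline_math_to_bule md_name lines (outline_math_to_bule md_name lines)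
def Claim_exact_outline_math_to_bule : Prop := ∀ (md_name : String) (lines : List String), Dom_outline_math_to_bule md_name lines → D_outline_math_to_bule md_name lines → outline_math_to_bule md_name lines ≠ outline_math_to_bule_alt md_name lines
def Claim_changed_outline_math_to_bule : Prop := Dom_outline_math_to_bule (pvDiffWitness_outline_math_to_bule.1) (pvDiffWitness_outline_math_to_bule.2) ∧ D_outline_math_to_bule (pvDiffWitness_outline_math_to_bule.1) (pvDiffWitness_outline_math_to_bule.2) ∧ outline_math_to_bule (pvDiffWitness_outline_math_to_bule.1) (pvDiffWitness_outline_math_to_bule.2) = pvDiffWitnessOut_outline_math_to_bule.1 ∧ outline_math_to_bule_alt (pvDiffWitness_outline_math_to_bule.1) (pvDiffWitness_outline_math_to_bule.2) = pvDiffWitnessOut_outline_math_to_bule.2 ∧ pvDiffWitnessOut_outline_math_to_bule.1 ≠ pvDiffWitnessOut_outline_math_to_bule.2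

-- ===== LEMMAS AND PROOFS =====

-- A's loop expressed as a block parser with the extra skip after each wrapped pair
def wrapSkip : List String → List String
  | [] => []
  | l :: rest =>
    if pfx l then
      match _h : rest.dropWhile (fun x => !pfx x) with
      | [] => l :: rest
      | [e] => l :: tcLine :: rest.takeWhile (fun x => !pfx x) ++ [rbLine, e]
      | e :: x :: r' => l :: tcLine :: rest.takeWhile (fun x => !pfx x) ++ rbLine :: e :: x :: wrapSkip r'
    else l :: wrapSkip rest
termination_by ls => ls.length
decreasing_by
  all_goals
    have h1 := List.length_dropWhile_le (fun x => !pfx x) rest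
  · rw [_h] at h1; simp at h1 ⊢; omega
  · simp

-- the value of A's loop from a waiting state (opener l, body scanned so far)
def wrapSkipCont (l : String) (body rest : List String) : List String :=
  match rest.dropWhile (fun x => !pfx x) with
  | [] => l :: (body ++ rest)
  | [e] => l :: tcLine :: (body ++ rest.takeWhile (fun x => !pfx x)) ++ [rbLine, e]
  | e :: x :: r' => l :: tcLine :: (body ++ rest.takeWhile (fun x => !pfx x)) ++ rbLine :: e :: x :: wrapSkip r'


-- --- small list helpers ---
lemma take_app_cons {a : Type} (acc : List a) (l : a) (t : List a) :
    (acc ++ l :: t).take (acc.length + 1) = acc ++ [l] := by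
  induction acc with
  | nil => simp
  | cons x xs ih => simp [List.length_cons, List.take_succ_cons, ih]

lemma drop_app_cons {a : Type} (acc : List a) (l : a) (t : List a) :
    (acc ++ l :: t).drop (acc.length + 1) = t := by
  induction acc with
  | nil => simp
  | cons x xs ih => simp [List.length_cons, List.drop_succ_cons, ih]

-- --- loopA step lemmas ---
lemma loopA_exit (fuel : Nat) (lines : List String) (lineloc : Int) (w : Bool) (sd : Int)
    (h : (lines.length : Int) ≤ lineloc) : loopA fuel lines lineloc w sd = lines := by
  cases fuel with
  | zero => rfl
  | succ f => rw [loopA]; rw [if_neg (by omega)]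

lemma loopA_start (f : Nat) (pre : List String) (y : String) (t : List String) (sd : Int)
    (hy : pfx y = true) :
    loopA (f + 1) (pre ++ y :: t) (pre.length : Int) false sd
      = loopA f (pre ++ y :: t) ((pre.length : Int) + 1) true (pre.length : Int) := by
  rw [loopA]
  rw [if_pos (by simp)]
  simp only [PySem.List.pyGet?_append_length, Option.getD_some, hy]
  simp

lemma loopA_skip (f : Nat) (pre : List String) (y : String) (t : List String) (w : Bool) (sd : Int)
    (hy : pfx y = false) :
    loopA (f + 1) (pre ++ y :: t) (pre.length : Int) w sd
      = loopA f (pre ++ y :: t) ((pre.length : Int) + 1) w sd := by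
  rw [loopA]
  rw [if_pos (by simp)]
  simp only [PySem.List.pyGet?_append_length, Option.getD_some, hy]
  simp

lemma loopA_pair (f : Nat) (acc : List String) (l : String) (body : List String) (x : String)
    (t : List String) (hx : pfx x = true) :
    loopA (f + 1) (acc ++ l :: (body ++ x :: t)) (((acc ++ l :: body).length : Int)) true (acc.length : Int)
      = loopA f (acc ++ l :: tcLine :: (body ++ rbLine :: x :: t)) (((acc ++ l :: body).length : Int) + 4) false (acc.length : Int) := by
  have hshape : acc ++ l :: (body ++ x :: t) = (acc ++ l :: body) ++ x :: t := by simp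
  rw [loopA]
  rw [if_pos (by rw [hshape]; simp)]
  rw [hshape]
  simp only [PySem.List.pyGet?_append_length, Option.getD_some, hx, Bool.not_true, Bool.and_false,
    Bool.false_and, Bool.and_true, if_false, Bool.true_and, if_true, Bool.and_self]
  have hins1 : PySem.List.insert ((acc ++ l :: body) ++ x :: t) ((acc.length : Int) + 1) tcLine
      = (acc ++ l :: tcLine :: body) ++ x :: t := by
    have hcast : (acc.length : Int) + 1 = ((acc.length + 1 : Nat) : Int) := by push_cast <;> omega
    rw [hcast, PySem.List.insert_natCast _ _ _ (by simp <;> omega)]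
    have h1 : (acc ++ l :: body) ++ x :: t = acc ++ l :: (body ++ x :: t) := by simp
    rw [h1, take_app_cons, drop_app_cons]
    simp
  rw [hins1]
  have hins2 : PySem.List.insert ((acc ++ l :: tcLine :: body) ++ x :: t) (((acc ++ l :: body).length : Int) + 1) rbLine
      = acc ++ l :: tcLine :: (body ++ rbLine :: x :: t) := by
    have hcast : ((acc ++ l :: body).length : Int) + 1 = (((acc ++ l :: tcLine :: body).length : Nat) : Int) := by simp <;> omega
    rw [hcast, PySem.List.insert_natCast _ _ _ (by simp)]
    rw [List.take_left, List.drop_left]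
    simp
  rw [hins2]
  have h34 : ((acc ++ l :: body).length : Int) + 3 + 1 = ((acc ++ l :: body).length : Int) + 4 := by ring
  rw [h34]
  simp

-- --- wrapSkip/wrapSkipCont bookkeeping ---
lemma wrapSkip_cons_pfx (l : String) (rest : List String) (hl : pfx l = true) :
    wrapSkip (l :: rest) = wrapSkipCont l [] rest := by
  rw [wrapSkip, wrapSkipCont, if_pos hl]
  rcases h : rest.dropWhile (fun x => !pfx x) with _ | ⟨e, _ | ⟨x, r'⟩⟩ <;> simp

lemma wrapSkip_cons_npfx (l : String) (rest : List String) (hl : pfx l = false) :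
    wrapSkip (l :: rest) = l :: wrapSkip rest := by
  rw [wrapSkip, if_neg (by simp [hl])]

lemma wrapSkipCont_shift (l : String) (body : List String) (hd : String) (tl : List String)
    (hh : pfx hd = false) :
    wrapSkipCont l body (hd :: tl) = wrapSkipCont l (body ++ [hd]) tl := by
  rw [wrapSkipCont, wrapSkipCont]
  rw [List.dropWhile_cons_of_pos (by simp [hh]), List.takeWhile_cons_of_pos (by simp [hh])]
  rcases h : tl.dropWhile (fun x => !pfx x) with _ | ⟨e, _ | ⟨x, r'⟩⟩ <;> simp

-- --- the master correspondence: A's cursor loop equals the skip block parser ---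
lemma loopA_master : ∀ (n : Nat) (rest : List String), rest.length ≤ n →
    (∀ (fuel : Nat) (acc : List String) (sd : Int), rest.length ≤ fuel →
        loopA fuel (acc ++ rest) (acc.length : Int) false sd = acc ++ wrapSkip rest)
    ∧ (∀ (fuel : Nat) (acc : List String) (l : String) (body : List String), rest.length ≤ fuel →
        pfx l = true → (∀ x ∈ body, pfx x = false) →
        loopA fuel (acc ++ l :: (body ++ rest)) (((acc ++ l :: body).length : Int)) true (acc.length : Int)
          = acc ++ wrapSkipCont l body rest) := by
  intro n
  induction n with
  | zero =>
    intro rest hrest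
    have hnil : rest = [] := List.length_eq_zero_iff.mp (by omega)
    subst hnil
    constructor
    · intro fuel acc sd _
      rw [loopA_exit _ _ _ _ _ (by simp)]
      simp [wrapSkip]
    · intro fuel acc l body _ hl hb
      rw [loopA_exit _ _ _ _ _ (by simp)]
      simp [wrapSkipCont]
  | succ n ih =>
    intro rest hrest
    rcases rest with _ | ⟨hd, tl⟩
    · constructor
      · intro fuel acc sd _
        rw [loopA_exit _ _ _ _ _ (by simp)]
        simp [wrapSkip]
      · intro fuel acc l body _ hl hb
        rw [loopA_exit _ _ _ _ _ (by simp)]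
        simp [wrapSkipCont]
    · constructor
      · -- not waiting, head hd
        intro fuel acc sd hf
        rcases fuel with _ | f
        · simp at hf
        rcases Bool.eq_false_or_eq_true (pfx hd) with hh | hh
        · rw [loopA_start f acc hd tl sd hh]
          have h2 := (ih tl (by simpa using hrest)).2 f acc hd [] (by simpa using hf) hh (by simp)
          simp only [List.nil_append, List.append_nil] at h2
          have hcast : ((acc ++ [hd]).length : Int) = (acc.length : Int) + 1 := by simp
          rw [wrapSkip_cons_pfx hd tl hh]
          simpa using h2
        · rw [loopA_skip f acc hd tl false sd hh]
          have h2 := (ih tl (by simpa using hrest)).1 f (acc ++ [hd]) sd (by simpa using hf)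
          rw [wrapSkip_cons_npfx hd tl hh]
          simpa using h2
      · -- waiting with opener l and body scanned, head hd
        intro fuel acc l body hf hl hb
        rcases fuel with _ | f
        · simp at hf
        rcases Bool.eq_false_or_eq_true (pfx hd) with hh | hh
        · -- close the pair
          rw [loopA_pair f acc l body hd tl hh]
          rcases tl with _ | ⟨x, tl'⟩
          · rw [loopA_exit _ _ _ _ _ (by simp <;> omega)]
            rw [wrapSkipCont]
            simp [List.dropWhile_cons, List.takeWhile_cons, hh]
          · have hACC : acc ++ l :: tcLine :: (body ++ rbLine :: hd :: x :: tl')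
                = (acc ++ l :: tcLine :: body ++ rbLine :: hd :: [x]) ++ tl' := by simp
            have hlen : ((acc ++ l :: body).length : Int) + 4
                = (((acc ++ l :: tcLine :: body ++ rbLine :: hd :: [x]).length : Nat) : Int) := by
              simp <;> omega
            rw [hACC, hlen]
            have h2 := (ih tl' (by simp at hrest; omega)).1 f
                (acc ++ l :: tcLine :: body ++ rbLine :: hd :: [x]) (acc.length : Int)
                (by simp at hf; omega)
            rw [h2]
            rw [wrapSkipCont]
            simp [List.dropWhile_cons, List.takeWhile_cons, hh]
        · -- extend the body
          have hshape : acc ++ l :: (body ++ hd :: tl) = (acc ++ l :: body) ++ hd :: tl := by simp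
          rw [hshape, loopA_skip f (acc ++ l :: body) hd tl true (acc.length : Int) hh]
          have h2 := (ih tl (by simpa using hrest)).2 f acc l (body ++ [hd])
              (by simpa using hf) hl
              (by intro z hz; rcases List.mem_append.mp hz with h | h
                  · exact hb z h
                  · simp at h; subst h; exact hh)
          have h3 : acc ++ l :: ((body ++ [hd]) ++ tl) = (acc ++ l :: body) ++ hd :: tl := by simp
          have h4 : (((acc ++ l :: (body ++ [hd])).length : Nat) : Int) = (((acc ++ l :: body).length : Nat) : Int) + 1 := by
            simp; push_cast; ring
          rw [h3, h4] at h2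
          rw [h2, wrapSkipCont_shift l body hd tl hh]

lemma A_eq_wrapSkip (md_name : String) (lines : List String) :
    outline_math_to_bule md_name lines = wrapSkip lines := by
  have h := (loopA_master lines.length lines le_rfl).1 (lines.length + 1) [] 0 (by omega)
  simpa [outline_math_to_bule] using h

-- --- badScan bookkeeping ---
lemma badScan_cons_npfx (l : String) (rest : List String) (w : Bool) (h : pfx l = false) :
    badScan (l :: rest) w = badScan rest w := by
  simp [badScan, h]

lemma badScan_body : ∀ (body : List String), (∀ x ∈ body, pfx x = false) →
    ∀ (ys : List String), badScan (body ++ ys) true = badScan ys true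
  | [], _, ys => rfl
  | b :: body', hb, ys => by
    rw [List.cons_append, badScan_cons_npfx b _ true (hb b (by simp))]
    exact badScan_body body' (fun x hx => hb x (by simp [hx])) ys

lemma badScan_chunk (l : String) (body : List String) (e : String) (r : List String)
    (hl : pfx l = true) (hb : ∀ x ∈ body, pfx x = false) (he : pfx e = true) :
    badScan (l :: (body ++ e :: r)) false
      = ((pfx (r.headD "") && (r.drop 1).any pfx) || badScan r false) := by
  rw [badScan]
  simp only [hl, Bool.and_false, Bool.false_and, Bool.and_true, Bool.false_or]
  rw [Bool.xor_false]
  rw [badScan_body body hb (e :: r), badScan]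
  simp [he]

-- --- emitAlt bookkeeping ---
lemma emitAlt_flush : ∀ (body : List String), (∀ x ∈ body, pfx x = false) →
    ∀ (p0 : String) (pend : List String), emitAlt body true (p0 :: pend) = p0 :: (pend ++ body)
  | [], _, p0, pend => by simp [emitAlt]
  | b :: body', hb, p0, pend => by
    have hbb : pfx b = false := hb b (by simp)
    rw [emitAlt]
    simp only [hbb, if_false, if_true, Bool.false_eq_true]
    have h2 := emitAlt_flush body' (fun x hx => hb x (by simp [hx])) p0 (pend ++ [b])
    simp only [List.cons_append] at h2 ⊢
    rw [h2]
    simp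

lemma emitAlt_close : ∀ (body : List String), (∀ x ∈ body, pfx x = false) →
    ∀ (e : String) (r : List String) (p0 : String) (pend : List String), pfx e = true →
    emitAlt (body ++ e :: r) true (p0 :: pend)
      = p0 :: tcLine :: (pend ++ body) ++ rbLine :: e :: emitAlt r false []
  | [], _, e, r, p0, pend, he => by
    rw [List.nil_append, emitAlt]
    simp [he]
  | b :: body', hb, e, r, p0, pend, he => by
    have hbb : pfx b = false := hb b (by simp)
    rw [List.cons_append, emitAlt]
    simp only [hbb, if_false, if_true, Bool.false_eq_true]
    have h2 := emitAlt_close body' (fun x hx => hb x (by simp [hx])) e r p0 (pend ++ [b]) he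
    simp only [List.cons_append] at h2 ⊢
    rw [h2]
    simp

lemma wrapSkip_id : ∀ (zs : List String), (∀ x ∈ zs, pfx x = false) → wrapSkip zs = zs
  | [], _ => by simp [wrapSkip]
  | z :: zs', h => by
    rw [wrapSkip_cons_npfx z zs' (h z (by simp))]
    rw [wrapSkip_id zs' (fun x hx => h x (by simp [hx]))]

-- head of dropWhile (not p) satisfies p
lemma pfx_head_dropWhile : ∀ (rest : List String) (e : String) (r : List String),
    rest.dropWhile (fun x => !pfx x) = e :: r → pfx e = true
  | [], e, r, h => by simp at h
  | a :: as, e, r, h => by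
    by_cases ha : pfx a
    · rw [List.dropWhile_cons_of_neg (by simp [ha])] at h
      injection h with h1 _
      exact h1 ▸ ha
    · rw [List.dropWhile_cons_of_pos (by simp [ha])] at h
      exact pfx_head_dropWhile as e r h

lemma mem_takeWhile_npfx (rest : List String) (x : String)
    (hx : x ∈ rest.takeWhile (fun x => !pfx x)) : pfx x = false := by
  have := List.mem_takeWhile_imp hx
  simpa using this

-- --- the skip parser agrees with B outside D_ ---
lemma skip_eq_alt_aux : ∀ (n : Nat) (lines : List String), lines.length ≤ n →
    badScan lines false = false → wrapSkip lines = emitAlt lines false [] := by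
  intro n
  induction n with
  | zero =>
    intro lines hlen _
    have : lines = [] := List.length_eq_zero_iff.mp (by omega)
    subst this; simp [wrapSkip, emitAlt]
  | succ n ih =>
    intro lines hlen hnd
    rcases lines with _ | ⟨l, rest⟩
    · simp [wrapSkip, emitAlt]
    rcases Bool.eq_false_or_eq_true (pfx l) with hl | hl
    case inr =>
      rw [wrapSkip_cons_npfx l rest hl, emitAlt]
      simp only [hl, Bool.false_eq_true, if_false]
      rw [ih rest (by simpa using hlen)
          (by rwa [badScan_cons_npfx l rest false hl] at hnd)]
    case inl =>
      have hsplit := List.takeWhile_append_dropWhile (p := fun x => !pfx x) (l := rest)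
      set body := rest.takeWhile (fun x => !pfx x) with hbody
      have hb : ∀ x ∈ body, pfx x = false := fun x hx => mem_takeWhile_npfx rest x hx
      rw [wrapSkip_cons_pfx l rest hl]
      rw [emitAlt]
      simp only [hl, if_true]
      rcases hdw : rest.dropWhile (fun x => !pfx x) with _ | ⟨e, _ | ⟨x, r'⟩⟩
      · -- no closing delimiter: everything after l is plain
        rw [wrapSkipCont, hdw]
        have hbr : body = rest := by rw [← hsplit, hdw]; simp
        rw [← hbr, emitAlt_flush body hb l []]
        simp [hbr]
      · -- single closing delimiter, nothing after it
        rw [wrapSkipCont, hdw]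
        have he : pfx e = true := pfx_head_dropWhile rest e [] hdw
        have hrest : rest = body ++ [e] := by rw [← hsplit, hdw]
        conv_rhs => rw [hrest]
        rw [emitAlt_close body hb e [] l [] he]
        simp [emitAlt]
        exact hbody.symm
      · -- closing delimiter followed by x and the tail r'
        rw [wrapSkipCont, hdw]
        have he : pfx e = true := pfx_head_dropWhile rest e (x :: r') hdw
        have hrest : rest = body ++ e :: x :: r' := by rw [← hsplit, hdw]
        have hchunk : ((pfx ((x :: r').headD "") && ((x :: r').drop 1).any pfx)
              || badScan (x :: r') false) = false := by
          rw [← badScan_chunk l body e (x :: r') hl hb he, ← hrest]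
          exact hnd
        rw [Bool.or_eq_false_iff] at hchunk
        conv_rhs => rw [hrest]
        rw [emitAlt_close body hb e (x :: r') l [] he]
        simp only [List.nil_append, Bool.false_eq_true, if_false, ← hbody]
        rcases Bool.eq_false_or_eq_true (pfx x) with hx | hx
        · -- x is a lone trailing opener: both sides leave x :: r' unchanged
          have hr' : ∀ z ∈ r', pfx z = false := by
            have h3 := hchunk.1
            simp only [List.headD_cons, hx, Bool.true_and, List.drop_succ_cons, List.drop_zero] at h3
            intro z hz
            have := (List.any_eq_false.mp h3) z hz
            simpa using this
          rw [wrapSkip_id r' hr']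
          rw [emitAlt]
          simp only [hx, if_true]
          rw [emitAlt_flush r' hr' x []]
          simp
        · -- x is not a delimiter: recurse past it
          have h1 : badScan r' false = false := by
            have h2 := hchunk.2
            rwa [badScan_cons_npfx x r' false hx] at h2
          have hlen' : r'.length ≤ n := by
            have h2 : rest.length ≤ n := by simpa using hlen
            rw [hrest] at h2; simp at h2; omega
          rw [emitAlt]
          simp only [hx, Bool.false_eq_true, if_false]
          rw [← ih r' hlen' h1]

theorem outline_math_to_bule_spec : Claim_unchanged_outline_math_to_bule := by
  intro md_name lines _ hnd
  have hfalse : badScan lines false = false := by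
    rcases h : badScan lines false
    · rfl
    · exact absurd h hnd
  rw [A_eq_wrapSkip md_name lines]
  exact skip_eq_alt_aux lines.length lines le_rfl hfalse

theorem outline_math_to_bule_changed : Claim_changed_outline_math_to_bule := by
  unfold Claim_changed_outline_math_to_bule; decide

-- --- tightness: inside D_ the two results always differ ---
lemma badScan_open (l : String) (body : List String) (hl : pfx l = true)
    (hb : ∀ x ∈ body, pfx x = false) : badScan (l :: body) false = false := by
  rw [badScan]
  simp only [hl, Bool.and_false, Bool.false_and, Bool.false_or, Bool.xor_false]
  simpa using badScan_body body hb []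

lemma wrapSkip_nonpfx_prefix : ∀ (body : List String), (∀ x ∈ body, pfx x = false) →
    ∀ (ys : List String), wrapSkip (body ++ ys) = body ++ wrapSkip ys
  | [], _, ys => rfl
  | b :: body', hb, ys => by
    rw [List.cons_append, wrapSkip_cons_npfx b _ (hb b (by simp))]
    rw [wrapSkip_nonpfx_prefix body' (fun x hx => hb x (by simp [hx])) ys]
    rfl

lemma head_wrapSkip_pfx (e : String) (r : List String) (he : pfx e = true) :
    (wrapSkip (e :: r)).head? = some e := by
  rw [wrapSkip_cons_pfx e r he, wrapSkipCont]
  rcases h : r.dropWhile (fun x => !pfx x) with _ | ⟨e2, _ | ⟨x2, r2⟩⟩ <;> simp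

lemma append_ne_cons_append {α : Type} (t : α) :
    ∀ (body U V : List α), U.head? ≠ some t → body ++ U ≠ t :: (body ++ V)
  | [], U, V, hU, h => by
    rcases U with _ | ⟨u, U'⟩
    · simp at h
    · simp only [List.nil_append] at h
      injection h with h1 _
      exact hU (by simp [h1])
  | b :: body', U, V, hU, h => by
    simp only [List.cons_append] at h
    injection h with h1 h2
    subst h1
    exact append_ne_cons_append b body' U V hU (by simpa using h2)

lemma ne_waiting (x : String) (r' : List String) (hx : pfx x = true)
    (hc : (r'.any pfx || badScan r' true) = true) :
    x :: wrapSkip r' ≠ emitAlt r' true [x] := by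
  have hsplit := List.takeWhile_append_dropWhile (p := fun z => !pfx z) (l := r')
  set body2 := r'.takeWhile (fun z => !pfx z) with hbody2
  have hb2 : ∀ z ∈ body2, pfx z = false := fun z hz => mem_takeWhile_npfx r' z hz
  rcases hdw2 : r'.dropWhile (fun z => !pfx z) with _ | ⟨e2, r2⟩
  · -- no delimiter in r' at all: the hypothesis hc is contradictory
    exfalso
    have hbr : body2 = r' := by rw [← hsplit, hdw2]; simp
    have hall : ∀ z ∈ r', pfx z = false := hbr ▸ hb2
    have h1 : r'.any pfx = false := by
      rw [List.any_eq_false]; intro z hz; simp [hall z hz]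
    have h2 : badScan r' true = false := by
      have := badScan_body r' hall []
      simpa using this
    rw [h1, h2] at hc
    simp at hc
  · have he2 : pfx e2 = true := pfx_head_dropWhile r' e2 r2 hdw2
    have hrest2 : r' = body2 ++ e2 :: r2 := by rw [← hsplit, hdw2]
    intro h
    conv_rhs at h => rw [hrest2]
    rw [emitAlt_close body2 hb2 e2 r2 x [] he2] at h
    injection h with _ h2
    rw [hrest2, wrapSkip_nonpfx_prefix body2 hb2 (e2 :: r2)] at h2
    simp only [List.nil_append] at h2
    refine append_ne_cons_append tcLine body2 (wrapSkip (e2 :: r2)) (rbLine :: e2 :: emitAlt r2 false []) ?_ h2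
    rw [head_wrapSkip_pfx e2 r2 he2]
    intro hcontra
    have : e2 = tcLine := by simpa using hcontra
    rw [this] at he2
    have : pfx tcLine = false := by decide
    rw [this] at he2
    exact absurd he2 (by simp)

lemma ne_aux : ∀ (n : Nat) (lines : List String), lines.length ≤ n →
    badScan lines false = true → wrapSkip lines ≠ emitAlt lines false [] := by
  intro n
  induction n with
  | zero =>
    intro lines hlen hbad
    have : lines = [] := List.length_eq_zero_iff.mp (by omega)
    subst this; simp [badScan] at hbad
  | succ n ih =>
    intro lines hlen hbad
    rcases lines with _ | ⟨l, rest⟩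
    · simp [badScan] at hbad
    rcases Bool.eq_false_or_eq_true (pfx l) with hl | hl
    case inr =>
      rw [badScan_cons_npfx l rest false hl] at hbad
      rw [wrapSkip_cons_npfx l rest hl, emitAlt]
      simp only [hl, Bool.false_eq_true, if_false]
      intro h
      injection h with _ h2
      exact ih rest (by simpa using hlen) hbad h2
    case inl =>
      have hsplit := List.takeWhile_append_dropWhile (p := fun z => !pfx z) (l := rest)
      set body := rest.takeWhile (fun z => !pfx z) with hbody
      have hb : ∀ z ∈ body, pfx z = false := fun z hz => mem_takeWhile_npfx rest z hz
      rw [wrapSkip_cons_pfx l rest hl]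
      rw [emitAlt]
      simp only [hl, if_true]
      rcases hdw : rest.dropWhile (fun z => !pfx z) with _ | ⟨e, _ | ⟨x, r'⟩⟩
      · exfalso
        have hbr : body = rest := by rw [← hsplit, hdw]; simp
        rw [← hbr] at hbad
        rw [badScan_open l body hl hb] at hbad
        simp at hbad
      · exfalso
        have he : pfx e = true := pfx_head_dropWhile rest e [] hdw
        have hrest : rest = body ++ [e] := by rw [← hsplit, hdw]
        rw [hrest, badScan_chunk l body e [] hl hb he] at hbad
        have hempty : pfx "" = false := by decide
        simp [badScan, hempty] at hbad
      · have he : pfx e = true := pfx_head_dropWhile rest e (x :: r') hdw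
        have hrest : rest = body ++ e :: x :: r' := by rw [← hsplit, hdw]
        have hcond : ((pfx x && r'.any pfx) || badScan (x :: r') false) = true := by
          rw [hrest, badScan_chunk l body e (x :: r') hl hb he] at hbad
          simpa using hbad
        rw [wrapSkipCont, hdw]
        conv_rhs => rw [hrest]
        rw [emitAlt_close body hb e (x :: r') l [] he]
        simp only [List.nil_append, Bool.false_eq_true, if_false, ← hbody]
        intro h
        have h2 : x :: wrapSkip r' = emitAlt (x :: r') false [] := by
          simp only [List.cons.injEq, List.append_cancel_left_eq, true_and] at h
          exact h
        rcases Bool.eq_false_or_eq_true (pfx x) with hx | hx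
        case inr =>
          rw [emitAlt] at h2
          simp only [hx, Bool.false_eq_true, if_false] at h2
          injection h2 with _ h9
          have hbad' : badScan r' false = true := by
            rcases Bool.eq_false_or_eq_true (badScan (x :: r') false) with hbs | hbs
            · rwa [badScan_cons_npfx x r' false hx] at hbs
            · rw [hbs] at hcond; simp [hx] at hcond
          have hlen' : r'.length ≤ n := by
            have hlr : rest.length ≤ n := by simpa using hlen
            rw [hrest] at hlr; simp at hlr; omega
          exact ih r' hlen' hbad' h9
        case inl =>
          rw [emitAlt] at h2
          simp only [hx, if_true] at h2
          have hc : (r'.any pfx || badScan r' true) = true := by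
            rcases Bool.eq_false_or_eq_true (r'.any pfx) with ha | ha
            · simp [ha]
            · rcases Bool.eq_false_or_eq_true (badScan r' true) with hbs | hbs
              · simp [hbs]
              · exfalso
                have hxb : badScan (x :: r') false = badScan r' true := by
                  rw [badScan]
                  simp [hx]
                rw [hxb, hbs, ha] at hcond
                simp at hcond
          exact ne_waiting x r' hx hc h2

theorem outline_math_to_bule_tight : Claim_exact_outline_math_to_bule := by
  intro md_name lines _ hd
  rw [A_eq_wrapSkip md_name lines]
  have hbad : badScan lines false = true := hd
  exact ne_aux lines.length lines le_rfl hbad
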